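-- pv_equiv track=rewrite | github.com/S-A-I-V/CodeForcesProblem | givlensumdigits.py | find_smallest_and_largest
-- ===== SOURCE A (Python) =====
-- def find_smallest_and_largest(m, s):
--     # If it's impossible to form the number
--     if s == 0 and m == 1:
--         return "0 0"
--     if s == 0 or s > 9 * m:
--         return "-1 -1"
--
--     # Construct the smallest number
--     smallest = [0] * m
--     sum_digits = s
--
--     for i in range(m - 1, -1, -1):
--         if sum_digits > 9:
--             smallest[i] = 9
--             sum_digits -= 9
--         else:
--             smallest[i] = sum_digits
--             sum_digits = 0
--
--     # Ensure the first digit is non-zero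
--     if smallest[0] == 0:
--         for i in range(1, m):
--             if smallest[i] > 0:
--                 smallest[i] -= 1
--                 smallest[0] = 1
--                 break
--
--     # Construct the largest number
--     largest = [0] * m
--     sum_digits = s
--
--     for i in range(m):
--         if sum_digits > 9:
--             largest[i] = 9
--             sum_digits -= 9
--         else:
--             largest[i] = sum_digits
--             sum_digits = 0
--
--     # Convert lists to strings
--     smallest_str = ''.join(map(str, smallest))
--     largest_str = ''.join(map(str, largest))
--
--     return f"{smallest_str} {largest_str}"
-- ===== SOURCE B (Python) =====
-- def find_smallest_and_largest(m, s):
--     # If it's impossible to form the number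
--     if s == 0 and m == 1:
--         return "0 0"
--     if s == 0 or s > 9 * m:
--         return "-1 -1"
--
--     # Largest: greedily place min(9, remaining) left to right.
--     largest = []
--     rem = s
--     for _ in range(m):
--         d = min(9, rem)
--         largest.append(d)
--         rem -= d
--
--     # Smallest: leading digit is known directly; the rest is the
--     # greedy fill of the leftover sum, read from the right.
--     d0 = max(1, s - 9 * (m - 1))
--     tail = []
--     rem = s - d0
--     for _ in range(m - 1):
--         d = min(9, rem)
--         tail.append(d)
--         rem -= d
--     smallest = [d0] + tail[::-1]
--
--     smallest_str = ''.join(map(str, smallest))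
--     largest_str = ''.join(map(str, largest))
--     return f"{smallest_str} {largest_str}"
-- ===== Notes on version B (the rewrite author's own statement) =====
-- stated objective: simpler
-- what changed: B keeps the three guards but replaces A's back-fill-then-repair construction of the smallest number by computing the leading digit directly as max(1, s-9*(m-1)) and greedily filling the remaining sum from the right, so the repair pass disappears; the largest number is built in one left-to-right greedy pass appending min(9, rem) instead of writing 9-or-remainder into a preallocated zero list.
-- outside the precondition, e.g. on find_smallest_and_largest(2, -5): A returns '0-5 -50', B returns '1-6 -50'; on find_smallest_and_largest(0, -3): A raises IndexError, B returns '6 '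
import Mathlib
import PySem

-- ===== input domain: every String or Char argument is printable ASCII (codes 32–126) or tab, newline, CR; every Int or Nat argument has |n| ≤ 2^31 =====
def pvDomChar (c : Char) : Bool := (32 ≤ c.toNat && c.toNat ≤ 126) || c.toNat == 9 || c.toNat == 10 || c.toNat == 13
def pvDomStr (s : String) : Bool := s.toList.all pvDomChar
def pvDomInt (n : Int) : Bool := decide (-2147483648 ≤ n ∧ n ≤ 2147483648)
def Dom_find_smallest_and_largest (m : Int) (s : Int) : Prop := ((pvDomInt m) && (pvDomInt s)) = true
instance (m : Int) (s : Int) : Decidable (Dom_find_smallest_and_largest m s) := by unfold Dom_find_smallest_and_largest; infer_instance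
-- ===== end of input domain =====

-- B drops A's back-fill-then-repair pass for the smallest number: it computes the leading
-- digit directly and greedily fills the rest; objective: simpler (same O(m) cost).

-- ===== PORT A =====
-- the digit-filling loop of A: walks the index list, writing 9 or the remaining sum
-- (all indices A passes are nonnegative, so .toNat is exact)
def aFill (idxs : List Int) (lst : List Int) (sumd : Int) : List Int × Int :=
  match idxs with
  | [] => (lst, sumd)
  | i :: rest =>
    if sumd > 9 then aFill rest (lst.set i.toNat 9) (sumd - 9)
    else aFill rest (lst.set i.toNat sumd) 0

-- A's repair loop: first index with a positive digit is decremented, position 0 set to 1, break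
def aRepair (idxs : List Int) (lst : List Int) : List Int :=
  match idxs with
  | [] => lst
  | i :: rest =>
    if ((PySem.List.pyGet? lst i).getD 0) > 0 then
      (lst.set i.toNat (((PySem.List.pyGet? lst i).getD 0) - 1)).set 0 1
    else aRepair rest lst

def find_smallest_and_largest (m : Int) (s : Int) : String :=
  if s == 0 && m == 1 then "0 0"
  else if s == 0 || s > 9 * m then "-1 -1"
  else
    let p := aFill (PySem.List.pyRange (m - 1) (-1) (-1)) (List.replicate m.toNat 0) s
    let smallest :=
      if (PySem.List.pyGet? p.1 0).getD 0 == 0 then aRepair (PySem.List.pyRange 1 m 1) p.1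
      else p.1
    let q := aFill (PySem.List.pyRange 0 m 1) (List.replicate m.toNat 0) s
    let smallest_str := String.join (smallest.map PySem.Int.toStr)
    let largest_str := String.join (q.1.map PySem.Int.toStr)
    smallest_str ++ " " ++ largest_str

-- ===== PORT B =====
-- B's greedy fill: n times, take min(9, rem) (cons-recursion = the appending loop of Source B)
def pvBuild (n : Nat) (rem : Int) : List Int :=
  match n with
  | 0 => []
  | Nat.succ k => (min 9 rem) :: pvBuild k (rem - min 9 rem)

def find_smallest_and_largest_alt (m : Int) (s : Int) : String :=
  if s == 0 && m == 1 then "0 0"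
  else if s == 0 || s > 9 * m then "-1 -1"
  else
    let largest := pvBuild m.toNat s
    let d0 := max 1 (s - 9 * (m - 1))
    let tail := pvBuild (m - 1).toNat (s - d0)
    let smallest := d0 :: tail.reverse
    let smallest_str := String.join (smallest.map PySem.Int.toStr)
    let largest_str := String.join (largest.map PySem.Int.toStr)
    smallest_str ++ " " ++ largest_str

-- ===== PRECONDITION & SPEC =====
-- Pre_ excludes negative digit sums s, outside the problem's meaning: there A raises
-- IndexError when m ≤ 0 and otherwise returns artefact strings containing negative
-- "digits" (e.g. '0-5 -50'), a corner value no implementation would specify.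
def Pre_find_smallest_and_largest (m : Int) (s : Int) : Prop := 0 ≤ s
instance (m : Int) (s : Int) : Decidable (Pre_find_smallest_and_largest m s) := by
  unfold Pre_find_smallest_and_largest; infer_instance

def pvWitness_find_smallest_and_largest : Int × Int := (3, 9)

def Spec_find_smallest_and_largest (m : Int) (s : Int) (out : String) : Prop := out = find_smallest_and_largest_alt m s
instance (m : Int) (s : Int) (out : String) : Decidable (Spec_find_smallest_and_largest m s out) := by unfold Spec_find_smallest_and_largest; infer_instance

-- ===== CLAIM (what is proved, stated in full; the proofs are below) =====
def Claim_equal_find_smallest_and_largest : Prop := ∀ (m : Int) (s : Int), Dom_find_smallest_and_largest m s → Pre_find_smallest_and_largest m s → Spec_find_smallest_and_largest m s (find_smallest_and_largest m s)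


-- ===== LEMMAS AND PROOFS =====

theorem pv_witness_ok : Dom_find_smallest_and_largest pvWitness_find_smallest_and_largest.1 pvWitness_find_smallest_and_largest.2 ∧ Pre_find_smallest_and_largest pvWitness_find_smallest_and_largest.1 pvWitness_find_smallest_and_largest.2 := by
  decide

-- writing at position pre.length of pre ++ x :: suf replaces x
theorem pv_set_len (pre suf : List Int) (x d : Int) :
    (pre ++ x :: suf).set pre.length d = pre ++ d :: suf := by
  simp

theorem pvBuild_zero (n : Nat) : pvBuild n 0 = List.replicate n 0 := by
  induction n with
  | zero => rfl
  | succ k ih => simp [pvBuild, ih, List.replicate_succ]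

-- splitting off a prefix of 'a' nines from the greedy fill
theorem pvBuild_split (a : Nat) : ∀ (n : Nat) (r : Int), 0 ≤ r → a ≤ n →
    pvBuild n (9 * a + r) = List.replicate a 9 ++ pvBuild (n - a) r := by
  induction a with
  | zero => intro n r _ _; simp
  | succ k ih =>
    intro n r hr han
    obtain ⟨n', rfl⟩ : ∃ n', n = n' + 1 := ⟨n - 1, by omega⟩
    have hmin : min 9 (9 * ((k : Int) + 1) + r) = 9 := by omega
    have : (9 : Int) * (↑k + 1) + r - 9 = 9 * k + r := by ring
    simp only [pvBuild, Nat.cast_add, Nat.cast_one, hmin, this]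
    rw [ih n' r hr (by omega)]
    simp [List.replicate_succ]

theorem pvBuild_small (k : Nat) (r : Int) (h0 : 0 ≤ r) (h9 : r ≤ 9) :
    pvBuild (k + 1) r = r :: List.replicate k 0 := by
  have hmin : min 9 r = r := by omega
  simp [pvBuild, hmin, pvBuild_zero]

-- A's ascending fill over pre ++ suf writes exactly B's greedy digits into suf
theorem pv_aFill_asc (suf : List Int) : ∀ (pre : List Int) (sum : Int),
    (aFill (PySem.List.pyRange (pre.length : Int) ((pre.length : Int) + suf.length) 1) (pre ++ suf) sum).1
      = pre ++ pvBuild suf.length sum := by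
  induction suf with
  | nil => intro pre sum; rw [PySem.List.pyRange_one_eq_nil (by simp)]; simp [aFill, pvBuild]
  | cons x suf' ih =>
    intro pre sum
    rw [PySem.List.pyRange_one_cons (by simp only [List.length_cons]; push_cast; omega)]
    have hend : ((pre.length : Int) + ((x :: suf').length : Int)) =
        (((pre ++ [min 9 sum]).length : Int) + (suf'.length : Int)) := by
      simp only [List.length_cons, List.length_append, List.length_nil]
      push_cast; ring
    have hstart : ((pre.length : Int) + 1) = (((pre ++ [min 9 sum]).length) : Int) := by
      simp
    by_cases h : sum > 9
    · have hmin : min 9 sum = 9 := by omega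
      simp only [aFill, if_pos h]
      rw [show ((pre.length : Int).toNat) = pre.length by omega, pv_set_len]
      rw [hmin] at hend hstart
      rw [hend, hstart, show (pre ++ (9 : Int) :: suf') = (pre ++ [(9 : Int)]) ++ suf' by simp,
          ih (pre ++ [(9:Int)]) (sum - 9)]
      simp [pvBuild, hmin]
    · have hmin : min 9 sum = sum := by omega
      simp only [aFill, if_neg h]
      rw [show ((pre.length : Int).toNat) = pre.length by omega, pv_set_len]
      rw [hmin] at hend hstart
      rw [hend, hstart, show (pre ++ sum :: suf') = (pre ++ [sum]) ++ suf' by simp,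
          ih (pre ++ [sum]) 0]
      simp [pvBuild, hmin]

-- A's descending fill over pre ++ done writes the greedy digits reversed into pre
theorem pv_aFill_desc (pre : List Int) : ∀ (done : List Int) (sum : Int),
    (aFill (PySem.List.pyRange ((pre.length : Int) - 1) (-1) (-1)) (pre ++ done) sum).1
      = (pvBuild pre.length sum).reverse ++ done := by
  induction pre using List.reverseRecOn with
  | nil => intro done sum; rw [PySem.List.pyRange_neg_one_eq_nil (by simp)]; simp [aFill, pvBuild]
  | append_singleton pre' x ih =>
    intro done sum
    have hL : (((pre' ++ [x]).length : Int) - 1) = (pre'.length : Int) := by simp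
    rw [hL, PySem.List.pyRange_neg_one_cons (by omega)]
    have hset : ∀ d : Int, ((pre' ++ [x]) ++ done).set (pre'.length : Int).toNat d = pre' ++ d :: done := by
      intro d
      rw [show ((pre'.length : Int).toNat) = pre'.length by omega,
          show ((pre' ++ [x]) ++ done) = pre' ++ x :: done by simp, pv_set_len]
    by_cases h : sum > 9
    · simp only [aFill, if_pos h]
      rw [hset, ih (9 :: done) (sum - 9)]
      have hmin : min 9 sum = 9 := by omega
      simp [pvBuild, hmin, List.reverse_cons]
    · simp only [aFill, if_neg h]
      rw [hset, ih (sum :: done) 0]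
      have hmin : min 9 sum = sum := by omega
      simp [pvBuild, hmin, List.reverse_cons]

-- A's repair loop: skips t zero entries starting at i, then hits a positive one
theorem pv_aRepair_scan (t : Nat) : ∀ (i : Int) (lst : List Int) (mm r : Int), 0 ≤ i →
    (∀ k : Nat, k < t → (PySem.List.pyGet? lst (i + k)).getD 0 = 0) →
    (PySem.List.pyGet? lst (i + t)).getD 0 = r → 0 < r → i + t < mm →
    aRepair (PySem.List.pyRange i mm 1) lst = (lst.set (i + t).toNat (r - 1)).set 0 1 := by
  induction t with
  | zero =>
    intro i lst mm r hi hzero hr hrpos hlt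
    simp only [Nat.cast_zero, add_zero] at hr hlt ⊢
    rw [PySem.List.pyRange_one_cons (by omega)]
    simp only [aRepair]
    rw [if_pos (by rw [hr]; exact hrpos), hr]
  | succ t' ih =>
    intro i lst mm r hi hzero hr hrpos hlt
    rw [PySem.List.pyRange_one_cons (by push_cast at hlt; omega)]
    simp only [aRepair]
    have h0 : (PySem.List.pyGet? lst i).getD 0 = 0 := by
      have := hzero 0 (by omega); simpa using this
    rw [if_neg (by rw [h0]; omega)]
    have hstep := ih (i + 1) lst mm r (by omega)
      (fun k hk => by
        have hz := hzero (k + 1) (by omega)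
        rwa [show (i + ((k + 1 : Nat) : Int)) = i + 1 + k by push_cast; ring] at hz)
      (by rwa [show (i + ((t' + 1 : Nat) : Int)) = i + 1 + t' by push_cast; ring] at hr)
      hrpos (by push_cast at hlt ⊢; omega)
    rw [hstep, show (i + 1 + (t' : Int)) = i + ((t' + 1 : Nat) : Int) by push_cast; ring]

-- main case 0 < s ≤ 9*m: both ports produce the same digit lists
theorem pv_main (m s : Int) (hs0 : 0 < s) (hsm : s ≤ 9 * m) :
    find_smallest_and_largest m s = find_smallest_and_largest_alt m s := by
  have hm : 1 ≤ m := by omega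
  have hg1 : ¬ ((s == 0 && m == 1) = true) := by simp; omega
  have hg2 : ¬ ((s == 0 || decide (s > 9 * m)) = true) := by simp; omega
  obtain ⟨a, r, hsar, hr0, hr9, ham⟩ :
      ∃ (a : Nat) (r : Int), s = 9 * a + r ∧ 0 < r ∧ r ≤ 9 ∧ a + 1 ≤ m.toNat := by
    refine ⟨((s - 1) / 9).toNat, s - 9 * ((s - 1) / 9).toNat, ?_, ?_, ?_, ?_⟩ <;> omega
  obtain ⟨z, hMz⟩ : ∃ z : Nat, m.toNat = a + z + 1 := ⟨m.toNat - a - 1, by omega⟩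
  -- closed form of B's greedy fill of s over m digits
  have hbuild : pvBuild m.toNat s = List.replicate a 9 ++ r :: List.replicate z 0 := by
    rw [show s = 9 * (a : Int) + r from hsar, pvBuild_split a m.toNat r (by omega) (by omega),
        show m.toNat - a = z + 1 by omega, pvBuild_small z r (by omega) (by omega)]
  -- A's ascending fill = B's largest
  have h1 := pv_aFill_asc (List.replicate m.toNat 0) [] s
  simp only [List.length_nil, Nat.cast_zero, zero_add, List.nil_append,
    List.length_replicate] at h1
  rw [show ((m.toNat : Int)) = m by omega] at h1
  -- A's descending fill = B's digits reversed
  have h2 := pv_aFill_desc (List.replicate m.toNat 0) [] s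
  simp only [List.length_replicate, List.append_nil] at h2
  rw [show ((m.toNat : Int) - 1) = m - 1 by omega] at h2
  unfold find_smallest_and_largest find_smallest_and_largest_alt
  rw [if_neg hg1, if_neg hg1, if_neg hg2, if_neg hg2]
  simp only [h1, h2, hbuild]
  cases z with
  | zero =>
    -- all m digits are needed: no repair, leading digit of B is s - 9*(m-1) = r
    have hrev : (List.replicate a 9 ++ r :: List.replicate 0 (0:Int)).reverse
        = r :: List.replicate a 9 := by simp
    have hhead : (PySem.List.pyGet? (r :: List.replicate a (9:Int)) 0).getD 0 = r :=
      by simp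
    have hd0 : max 1 (s - 9 * (m - 1)) = r := by
      have : s - 9 * (m - 1) = r := by omega
      rw [this, max_eq_right (by omega)]
    have htail : pvBuild (m - 1).toNat (s - r) = List.replicate a 9 := by
      rw [show (m - 1).toNat = a by omega, show s - r = 9 * (a : Int) + 0 by omega,
          pvBuild_split a a 0 (le_refl 0) (le_refl a)]
      simp [pvBuild_zero]
    rw [hrev, hd0, htail]
    rw [if_neg (by rw [hhead]; simp; omega)]
    simp
  | succ z' =>
    -- leading digit of the back-fill is 0: A repairs, B starts with 1
    have hrev : (List.replicate a 9 ++ r :: List.replicate (z' + 1) (0:Int)).reverse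
        = (0:Int) :: (List.replicate z' 0 ++ r :: List.replicate a 9) := by
      simp [List.replicate_succ, List.reverse_replicate]
      rw [show ((0:Int) :: r :: List.replicate a 9) = [0] ++ r :: List.replicate a 9 from rfl,
          ← List.append_assoc, ← List.replicate_succ', List.replicate_succ, List.cons_append]
    have hd0 : max 1 (s - 9 * (m - 1)) = 1 := by
      rw [max_eq_left (by omega)]
    have hrep : aRepair (PySem.List.pyRange 1 m 1)
        ((0:Int) :: (List.replicate z' 0 ++ r :: List.replicate a 9))
        = 1 :: (List.replicate z' 0 ++ (r - 1) :: List.replicate a 9) := by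
      have hscan := pv_aRepair_scan z' 1
        ((0:Int) :: (List.replicate z' 0 ++ r :: List.replicate a 9)) m r (by omega)
        (fun k hk => by
          rw [show ((1:Int) + k) = (k:Int) + 1 by ring, PySem.List.pyGet?_cons_succ,
              PySem.List.pyGet?_natCast]
          simp [List.getElem?_append, hk])
        (by
          rw [show ((1:Int) + z') = (z':Int) + 1 by ring, PySem.List.pyGet?_cons_succ,
              PySem.List.pyGet?_natCast]
          simp)
        hr0 (by omega)
      rw [hscan, show ((1:Int) + z').toNat = (List.replicate (z' + 1) (0:Int)).length by
            simp; omega,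
          show ((0:Int) :: (List.replicate z' 0 ++ r :: List.replicate a 9))
              = List.replicate (z' + 1) (0:Int) ++ r :: List.replicate a 9 by
            simp [List.replicate_succ],
          pv_set_len]
      rw [show List.replicate (z' + 1) (0:Int) = 0 :: List.replicate z' 0 from
            List.replicate_succ .., List.cons_append, List.set_cons_zero]
    have htail : pvBuild (m - 1).toNat (s - 1)
        = List.replicate a 9 ++ (r - 1) :: List.replicate z' 0 := by
      rw [show (m - 1).toNat = a + z' + 1 by omega,
          show s - 1 = 9 * (a : Int) + (r - 1) by omega,
          pvBuild_split a (a + z' + 1) (r - 1) (by omega) (by omega),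
          show a + z' + 1 - a = z' + 1 by omega,
          pvBuild_small z' (r - 1) (by omega) (by omega)]
    rw [hrev, hd0, htail]
    rw [if_pos (by simp [PySem.List.pyGet?_zero_cons])]
    rw [hrep]
    simp

-- ===== VERDICT (by name: the statement is the Claim_ definition above) =====
theorem find_smallest_and_largest_spec : Claim_equal_find_smallest_and_largest := by
  intro m s _ hpre
  unfold Spec_find_smallest_and_largest
  by_cases h1 : (s == 0 && m == 1) = true
  · unfold find_smallest_and_largest find_smallest_and_largest_alt
    rw [if_pos h1, if_pos h1]
  · by_cases h2 : (s == 0 || decide (s > 9 * m)) = true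
    · unfold find_smallest_and_largest find_smallest_and_largest_alt
      rw [if_neg h1, if_neg h1, if_pos h2, if_pos h2]
    · have hs0 : 0 < s := by
        simp only [Bool.or_eq_true, beq_iff_eq, decide_eq_true_eq, not_or] at h2
        have : (0:Int) ≤ s := hpre
        omega
      have hsm : s ≤ 9 * m := by
        simp only [Bool.or_eq_true, beq_iff_eq, decide_eq_true_eq, not_or] at h2
        omega
      exact pv_main m s hs0 hsm
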